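-- pv_equiv track=rewrite | github.com/wuyazai-121/nanfang1221 | scripts/import_stm32.py | derive_interfaces
-- ===== SOURCE A (Python) =====
-- from typing import Dict, Iterable, List, Optional
--
-- def derive_interfaces(cores: List[Dict]) -> List[str]:
--     interfaces = {"GPIO"}
--     if not cores:
--         return sorted(interfaces)
--     peripherals = cores[0].get("peripherals") or []
--     names = [str(p.get("name") or "") for p in peripherals]
--     if any(n.startswith("I2C") for n in names):
--         interfaces.add("I2C")
--     if any(n.startswith("SPI") for n in names):
--         interfaces.add("SPI")
--     if any(n.startswith("USART") or n.startswith("UART") for n in names):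
--         interfaces.add("UART")
--     if any(n.startswith("ADC") for n in names):
--         interfaces.add("ADC")
--     if any(n.startswith("DAC") for n in names):
--         interfaces.add("DAC")
--     if any(n.startswith("USB") for n in names):
--         interfaces.add("USB")
--     if any(n.startswith("CAN") for n in names):
--         interfaces.add("CAN")
--     if any(n.startswith("ETH") for n in names):
--         interfaces.add("ETH")
--     if any(n.startswith("SDMMC") or n.startswith("SDIO") for n in names):
--         interfaces.add("SDMMC")
--     if any(n.startswith("I2S") for n in names):
--         interfaces.add("I2S")
--     if any(n.startswith("SAI") for n in names):
--         interfaces.add("SAI")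
--     return sorted(interfaces)
-- ===== SOURCE B (Python) =====
-- _PREFIX_MAP = {
--     "I2C": "I2C", "SPI": "SPI", "USART": "UART", "UART": "UART",
--     "ADC": "ADC", "DAC": "DAC", "USB": "USB", "CAN": "CAN",
--     "ETH": "ETH", "SDMMC": "SDMMC", "SDIO": "SDMMC",
--     "I2S": "I2S", "SAI": "SAI",
-- }
--
-- def derive_interfaces(cores):
--     interfaces = {"GPIO"}
--     if not cores:
--         return sorted(interfaces)
--     peripherals = cores[0].get("peripherals") or []
--     for p in peripherals:
--         n = str(p.get("name") or "")
--         # every key of _PREFIX_MAP has length 3, 4 or 5, so slice and hash-look-up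
--         for length in (3, 4, 5):
--             iface = _PREFIX_MAP.get(n[:length])
--             if iface is not None:
--                 interfaces.add(iface)
--     return sorted(interfaces)
-- ===== Notes on version B (the rewrite author's own statement) =====
-- stated objective: alternative
-- what changed: Replaces A's eleven per-interface any()-scans with startswith over the whole name list by a single pass over the peripherals that slices each name to lengths 3/4/5 and hash-looks the slice up in a prefix-keyed dict (no startswith, no intermediate names list).
import Mathlib
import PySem

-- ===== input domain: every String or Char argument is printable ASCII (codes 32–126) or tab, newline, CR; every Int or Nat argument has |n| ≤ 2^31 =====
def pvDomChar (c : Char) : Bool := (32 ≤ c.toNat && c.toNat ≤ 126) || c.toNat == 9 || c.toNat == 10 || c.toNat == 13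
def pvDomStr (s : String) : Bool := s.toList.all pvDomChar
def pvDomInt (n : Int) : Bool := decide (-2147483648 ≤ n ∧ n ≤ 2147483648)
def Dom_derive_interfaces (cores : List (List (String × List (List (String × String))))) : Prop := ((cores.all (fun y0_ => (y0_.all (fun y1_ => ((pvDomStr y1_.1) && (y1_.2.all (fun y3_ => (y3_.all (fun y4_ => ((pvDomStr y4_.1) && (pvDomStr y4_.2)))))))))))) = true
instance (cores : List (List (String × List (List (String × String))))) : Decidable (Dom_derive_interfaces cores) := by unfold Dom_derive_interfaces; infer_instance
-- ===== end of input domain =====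

-- B replaces A's eleven any()-passes with startswith by one pass over the peripherals
-- that slices each name to lengths 3/4/5 and looks the slice up in a prefix-keyed dict;
-- same result, proved equal on all inputs.

-- ===== PORT A =====
-- `cores[0].get("peripherals") or []`: the `or` replaces None and the empty list by []
def pvOrList (o : Option (List (List (String × String)))) : List (List (String × String)) :=
  match o with
  | none => []
  | some l => if l = [] then [] else l

-- `str(p.get("name") or "")`: `or` replaces None and "" by ""; str() on a str is identity
def pvName (p : List (String × String)) : String :=
  match (PySem.Dict.mk p).get? "name" with
  | none => ""
  | some s => if s = "" then "" else s

def derive_interfaces (cores : List (List (String × List (List (String × String))))) : List String :=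
  let interfaces : PySem.Set String := PySem.Set.ofList ["GPIO"]
  match cores with
  | [] => PySem.List.sorted interfaces (fun x => x) false
  | core0 :: _ =>
    let peripherals := pvOrList ((PySem.Dict.mk core0).get? "peripherals")
    let names := peripherals.map pvName
    let interfaces := if names.any (fun n => PySem.Str.startswith n "I2C") then PySem.Set.add interfaces "I2C" else interfaces
    let interfaces := if names.any (fun n => PySem.Str.startswith n "SPI") then PySem.Set.add interfaces "SPI" else interfaces
    let interfaces := if names.any (fun n => PySem.Str.startswith n "USART" || PySem.Str.startswith n "UART") then PySem.Set.add interfaces "UART" else interfaces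
    let interfaces := if names.any (fun n => PySem.Str.startswith n "ADC") then PySem.Set.add interfaces "ADC" else interfaces
    let interfaces := if names.any (fun n => PySem.Str.startswith n "DAC") then PySem.Set.add interfaces "DAC" else interfaces
    let interfaces := if names.any (fun n => PySem.Str.startswith n "USB") then PySem.Set.add interfaces "USB" else interfaces
    let interfaces := if names.any (fun n => PySem.Str.startswith n "CAN") then PySem.Set.add interfaces "CAN" else interfaces
    let interfaces := if names.any (fun n => PySem.Str.startswith n "ETH") then PySem.Set.add interfaces "ETH" else interfaces
    let interfaces := if names.any (fun n => PySem.Str.startswith n "SDMMC" || PySem.Str.startswith n "SDIO") then PySem.Set.add interfaces "SDMMC" else interfaces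
    let interfaces := if names.any (fun n => PySem.Str.startswith n "I2S") then PySem.Set.add interfaces "I2S" else interfaces
    let interfaces := if names.any (fun n => PySem.Str.startswith n "SAI") then PySem.Set.add interfaces "SAI" else interfaces
    PySem.List.sorted interfaces (fun x => x) false

-- ===== PORT B =====
-- _PREFIX_MAP of Source B: a dict keyed by the prefixes (all of length 3, 4 or 5)
def pvPrefixMap : PySem.Dict String String :=
  PySem.Dict.mk
    [("I2C", "I2C"), ("SPI", "SPI"), ("USART", "UART"), ("UART", "UART"),
     ("ADC", "ADC"), ("DAC", "DAC"), ("USB", "USB"), ("CAN", "CAN"),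
     ("ETH", "ETH"), ("SDMMC", "SDMMC"), ("SDIO", "SDMMC"),
     ("I2S", "I2S"), ("SAI", "SAI")]

-- loop body `iface = _PREFIX_MAP.get(n[:length]); if iface is not None: interfaces.add(iface)`
def pvLookupStep (n : String) (acc : PySem.Set String) (L : Int) : PySem.Set String :=
  match pvPrefixMap.get? (PySem.Str.slice n none (some L)) with
  | some iface => PySem.Set.add acc iface
  | none => acc

-- `for length in (3, 4, 5): ...` over one name
def pvScan (acc : PySem.Set String) (n : String) : PySem.Set String :=
  ([3, 4, 5] : List Int).foldl (pvLookupStep n) acc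

def derive_interfaces_alt (cores : List (List (String × List (List (String × String))))) : List String :=
  let interfaces : PySem.Set String := PySem.Set.ofList ["GPIO"]
  match cores with
  | [] => PySem.List.sorted interfaces (fun x => x) false
  | core0 :: _ =>
    let peripherals := pvOrList ((PySem.Dict.mk core0).get? "peripherals")
    let interfaces := peripherals.foldl (fun acc p => pvScan acc (pvName p)) interfaces
    PySem.List.sorted interfaces (fun x => x) false

-- ===== PRECONDITION & SPEC =====
def Spec_derive_interfaces (cores : List (List (String × List (List (String × String))))) (out : List String) : Prop := out = derive_interfaces_alt cores
instance (cores : List (List (String × List (List (String × String))))) (out : List String) : Decidable (Spec_derive_interfaces cores out) := by unfold Spec_derive_interfaces; infer_instance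

-- ===== CLAIM (what is proved, stated in full; the proofs are below) =====
def Claim_equal_derive_interfaces : Prop := ∀ (cores : List (List (String × List (List (String × String))))), Dom_derive_interfaces cores → Spec_derive_interfaces cores (derive_interfaces cores)

-- ===== LEMMAS AND PROOFS =====

theorem mem_set_add_if {x v : String} {c : Prop} [Decidable c] {s : PySem.Set String} :
    x ∈ (if c then PySem.Set.add s v else s) ↔ x ∈ s ∨ (c ∧ x = v) := by
  split_ifs with h <;> simp [PySem.Set.mem_add] <;> tauto

theorem nodup_set_add_if {v : String} {c : Prop} [Decidable c] {s : PySem.Set String} (h : s.Nodup) :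
    (if c then PySem.Set.add s v else s).Nodup := by
  split_ifs
  · exact PySem.Set.nodup_add _ _ h
  · exact h

-- the items of pvPrefixMap, as a plain list (proof-side view of B's dict)
def pvPrefixTable : List (String × String) :=
  [("I2C", "I2C"), ("SPI", "SPI"), ("USART", "UART"), ("UART", "UART"),
   ("ADC", "ADC"), ("DAC", "DAC"), ("USB", "USB"), ("CAN", "CAN"),
   ("ETH", "ETH"), ("SDMMC", "SDMMC"), ("SDIO", "SDMMC"),
   ("I2S", "I2S"), ("SAI", "SAI")]

-- some row of the table fires on name n and yields interface x
def pvHit (x n : String) : Prop :=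
  ∃ pi ∈ pvPrefixTable, PySem.Str.startswith n pi.1 = true ∧ x = pi.2

theorem get?_table (k v : String) : pvPrefixMap.get? k = some v ↔ (k, v) ∈ pvPrefixTable :=
  PySem.Dict.get?_eq_some_iff_mem_items pvPrefixMap k v (by decide)

theorem slice_take (n : String) (L : Int) (hL : 0 ≤ L) :
    (PySem.Str.slice n none (some L)).toList = n.toList.take L.toNat := by
  rw [PySem.Str.toList_slice, PySem.Chars.slice_eq_listSlice, PySem.List.slice_to _ hL]

theorem startswith_of_prefix (n p : String) (h : p.toList <+: n.toList) :
    PySem.Str.startswith n p = true := by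
  rw [PySem.Str.startswith_eq]
  exact (PySem.Chars.startswith_iff _ _).mpr h

-- B's three slice-lookups on a name fire exactly where a table row's prefix matches it
theorem hit_iff (n x : String) :
    (∃ L ∈ ([3, 4, 5] : List Int), pvPrefixMap.get? (PySem.Str.slice n none (some L)) = some x)
    ↔ pvHit x n := by
  constructor
  · rintro ⟨L, hL, hget⟩
    have hL0 : 0 ≤ L := by
      simp only [List.mem_cons, List.not_mem_nil, or_false] at hL
      rcases hL with rfl | rfl | rfl <;> norm_num
    refine ⟨(PySem.Str.slice n none (some L), x), (get?_table _ _).mp hget, ?_, rfl⟩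
    exact startswith_of_prefix _ _ (by rw [slice_take _ _ hL0]; exact List.take_prefix _ _)
  · rintro ⟨⟨p, i⟩, hmem, hsw, rfl⟩
    have hp : p.toList <+: n.toList := by
      rw [PySem.Str.startswith_eq] at hsw
      exact (PySem.Chars.startswith_iff _ _).mp hsw
    have hlen : ((p.toList.length : Int)) ∈ ([3, 4, 5] : List Int) := by
      fin_cases hmem <;> decide
    refine ⟨(p.toList.length : Int), hlen, ?_⟩
    have hs : PySem.Str.slice n none (some (p.toList.length : Int)) = p := by
      apply String.toList_inj.mp
      rw [slice_take _ _ (by positivity), Int.toNat_natCast]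
      exact (List.prefix_iff_eq_take.mp hp).symm
    rw [hs]
    exact (get?_table _ _).mpr hmem

theorem mem_lookupStep {x n : String} {acc : PySem.Set String} {L : Int} :
    x ∈ pvLookupStep n acc L
    ↔ x ∈ acc ∨ pvPrefixMap.get? (PySem.Str.slice n none (some L)) = some x := by
  unfold pvLookupStep
  cases h : pvPrefixMap.get? (PySem.Str.slice n none (some L)) <;>
    simp [PySem.Set.mem_add, eq_comm]

theorem nodup_lookupStep {n : String} {acc : PySem.Set String} {L : Int} (h : acc.Nodup) :
    (pvLookupStep n acc L).Nodup := by
  unfold pvLookupStep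
  cases pvPrefixMap.get? (PySem.Str.slice n none (some L))
  · exact h
  · exact PySem.Set.nodup_add _ _ h

theorem mem_scan_aux {x n : String} (Ls : List Int) (acc : PySem.Set String) :
    x ∈ Ls.foldl (pvLookupStep n) acc
    ↔ x ∈ acc ∨ ∃ L ∈ Ls, pvPrefixMap.get? (PySem.Str.slice n none (some L)) = some x := by
  induction Ls generalizing acc with
  | nil => simp
  | cons L t ih =>
    simp only [List.foldl_cons, ih, mem_lookupStep, List.mem_cons]
    constructor
    · rintro ((h | h) | ⟨l, hl, hh⟩)
      · exact Or.inl h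
      · exact Or.inr ⟨L, Or.inl rfl, h⟩
      · exact Or.inr ⟨l, Or.inr hl, hh⟩
    · rintro (h | ⟨l, (rfl | hl), hh⟩)
      · exact Or.inl (Or.inl h)
      · exact Or.inl (Or.inr hh)
      · exact Or.inr ⟨l, hl, hh⟩

theorem nodup_scan_aux {n : String} (Ls : List Int) (acc : PySem.Set String) (h : acc.Nodup) :
    (Ls.foldl (pvLookupStep n) acc).Nodup := by
  induction Ls generalizing acc with
  | nil => exact h
  | cons L t ih => exact ih _ (nodup_lookupStep h)

theorem mem_pvScan {x n : String} (acc : PySem.Set String) :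
    x ∈ pvScan acc n ↔ x ∈ acc ∨ pvHit x n := by
  rw [pvScan, mem_scan_aux, hit_iff]

theorem nodup_pvScan {n : String} (acc : PySem.Set String) (h : acc.Nodup) :
    (pvScan acc n).Nodup := nodup_scan_aux _ _ h

theorem mem_outerB {x : String} (ps : List (List (String × String))) (acc : PySem.Set String) :
    x ∈ ps.foldl (fun acc p => pvScan acc (pvName p)) acc
    ↔ x ∈ acc ∨ ∃ p ∈ ps, pvHit x (pvName p) := by
  induction ps generalizing acc with
  | nil => simp
  | cons q t ih =>
    simp only [List.foldl_cons, ih, mem_pvScan, List.mem_cons]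
    constructor
    · rintro ((h | h) | ⟨p, hp, hh⟩)
      · exact Or.inl h
      · exact Or.inr ⟨q, Or.inl rfl, h⟩
      · exact Or.inr ⟨p, Or.inr hp, hh⟩
    · rintro (h | ⟨p, (rfl | hp), hh⟩)
      · exact Or.inl (Or.inl h)
      · exact Or.inl (Or.inr hh)
      · exact Or.inr ⟨p, hp, hh⟩

theorem nodup_outerB (ps : List (List (String × String))) (acc : PySem.Set String) (h : acc.Nodup) :
    (ps.foldl (fun acc p => pvScan acc (pvName p)) acc).Nodup := by
  induction ps generalizing acc with
  | nil => exact h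
  | cons q t ih => exact ih _ (nodup_pvScan _ h)

-- the propositional core: A's eleven any()-conditions vs B's table hits
set_option maxHeartbeats 1000000 in
theorem pv_key (names : List String) (x : String) :
    (x = "GPIO"
      ∨ (names.any (fun n => PySem.Str.startswith n "I2C") = true ∧ x = "I2C")
      ∨ (names.any (fun n => PySem.Str.startswith n "SPI") = true ∧ x = "SPI")
      ∨ (names.any (fun n => PySem.Str.startswith n "USART" || PySem.Str.startswith n "UART") = true ∧ x = "UART")
      ∨ (names.any (fun n => PySem.Str.startswith n "ADC") = true ∧ x = "ADC")
      ∨ (names.any (fun n => PySem.Str.startswith n "DAC") = true ∧ x = "DAC")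
      ∨ (names.any (fun n => PySem.Str.startswith n "USB") = true ∧ x = "USB")
      ∨ (names.any (fun n => PySem.Str.startswith n "CAN") = true ∧ x = "CAN")
      ∨ (names.any (fun n => PySem.Str.startswith n "ETH") = true ∧ x = "ETH")
      ∨ (names.any (fun n => PySem.Str.startswith n "SDMMC" || PySem.Str.startswith n "SDIO") = true ∧ x = "SDMMC")
      ∨ (names.any (fun n => PySem.Str.startswith n "I2S") = true ∧ x = "I2S")
      ∨ (names.any (fun n => PySem.Str.startswith n "SAI") = true ∧ x = "SAI"))
    ↔ x = "GPIO" ∨ ∃ n ∈ names, pvHit x n := by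
  simp only [List.any_eq_true, Bool.or_eq_true, pvHit, pvPrefixTable, List.mem_cons,
    List.not_mem_nil, or_false, exists_eq_or_imp, exists_eq_left]
  constructor
  · rintro (rfl | ⟨⟨n, hn, hs⟩, rfl⟩ | ⟨⟨n, hn, hs⟩, rfl⟩ | ⟨⟨n, hn, hs⟩, rfl⟩ | ⟨⟨n, hn, hs⟩, rfl⟩ |
      ⟨⟨n, hn, hs⟩, rfl⟩ | ⟨⟨n, hn, hs⟩, rfl⟩ | ⟨⟨n, hn, hs⟩, rfl⟩ | ⟨⟨n, hn, hs⟩, rfl⟩ |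
      ⟨⟨n, hn, hs⟩, rfl⟩ | ⟨⟨n, hn, hs⟩, rfl⟩ | ⟨⟨n, hn, hs⟩, rfl⟩)
    · exact Or.inl rfl
    all_goals refine Or.inr ⟨n, hn, ?_⟩
    all_goals simp
    all_goals tauto
  · rintro (rfl | ⟨n, hn, hh⟩)
    · exact Or.inl rfl
    · rcases hh with ⟨h1, rfl⟩ | ⟨h1, rfl⟩ | ⟨h1, rfl⟩ | ⟨h1, rfl⟩ | ⟨h1, rfl⟩ | ⟨h1, rfl⟩ |
        ⟨h1, rfl⟩ | ⟨h1, rfl⟩ | ⟨h1, rfl⟩ | ⟨h1, rfl⟩ | ⟨h1, rfl⟩ | ⟨h1, rfl⟩ | ⟨h1, rfl⟩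
      all_goals refine Or.inr ?_
      all_goals first
        | exact Or.inl ⟨⟨n, hn, h1⟩, rfl⟩
        | exact Or.inr (Or.inl ⟨⟨n, hn, h1⟩, rfl⟩)
        | exact Or.inr (Or.inr (Or.inl ⟨⟨n, hn, Or.inl h1⟩, rfl⟩))
        | exact Or.inr (Or.inr (Or.inl ⟨⟨n, hn, Or.inr h1⟩, rfl⟩))
        | exact Or.inr (Or.inr (Or.inr (Or.inl ⟨⟨n, hn, h1⟩, rfl⟩)))
        | exact Or.inr (Or.inr (Or.inr (Or.inr (Or.inl ⟨⟨n, hn, h1⟩, rfl⟩))))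
        | exact Or.inr (Or.inr (Or.inr (Or.inr (Or.inr (Or.inl ⟨⟨n, hn, h1⟩, rfl⟩)))))
        | exact Or.inr (Or.inr (Or.inr (Or.inr (Or.inr (Or.inr (Or.inl ⟨⟨n, hn, h1⟩, rfl⟩))))))
        | exact Or.inr (Or.inr (Or.inr (Or.inr (Or.inr (Or.inr (Or.inr (Or.inl ⟨⟨n, hn, h1⟩, rfl⟩)))))))
        | exact Or.inr (Or.inr (Or.inr (Or.inr (Or.inr (Or.inr (Or.inr (Or.inr (Or.inl ⟨⟨n, hn, Or.inl h1⟩, rfl⟩))))))))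
        | exact Or.inr (Or.inr (Or.inr (Or.inr (Or.inr (Or.inr (Or.inr (Or.inr (Or.inl ⟨⟨n, hn, Or.inr h1⟩, rfl⟩))))))))
        | exact Or.inr (Or.inr (Or.inr (Or.inr (Or.inr (Or.inr (Or.inr (Or.inr (Or.inr (Or.inl ⟨⟨n, hn, h1⟩, rfl⟩)))))))))
        | exact Or.inr (Or.inr (Or.inr (Or.inr (Or.inr (Or.inr (Or.inr (Or.inr (Or.inr (Or.inr ⟨⟨n, hn, h1⟩, rfl⟩)))))))))

-- ===== VERDICT (by name: the statement is the Claim_ definition above) =====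
set_option maxHeartbeats 1000000 in
theorem derive_interfaces_spec : Claim_equal_derive_interfaces := by
  intro cores _
  unfold Spec_derive_interfaces derive_interfaces derive_interfaces_alt
  cases cores with
  | nil => rfl
  | cons core0 rest =>
    apply (PySem.List.sorted_id_eq_sorted_id_iff_perm _ _).mpr
    refine (List.perm_ext_iff_of_nodup ?_ ?_).mpr ?_
    · repeat apply nodup_set_add_if
      exact PySem.Set.nodup_ofList _
    · exact nodup_outerB _ _ (PySem.Set.nodup_ofList _)
    · intro x
      rw [mem_outerB]
      simp only [mem_set_add_if, PySem.Set.mem_ofList, List.mem_singleton, or_assoc]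
      rw [pv_key]
      constructor <;> rintro (h | ⟨n, hn, hh⟩)
      · exact Or.inl h
      · rcases List.mem_map.mp hn with ⟨p, hp, rfl⟩
        exact Or.inr ⟨p, hp, hh⟩
      · exact Or.inl h
      · exact Or.inr ⟨pvName n, List.mem_map_of_mem hn, hh⟩
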